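-- pv_equiv track=rewrite | github.com/Kinshuk2003/30_days_of_code | Easy/Rearrange an array such that arr[i] = i.py | modifyArray
-- ===== SOURCE A (Python) =====
-- def modifyArray (arr,  n) :
--     ht={}
--     for i in arr:
--         if i in ht:
--             ht[i] +=1
--         else:
--             ht[i]=1
--
--     ans=[-1]*n
--     for i in range(0,n):
--         if i in ht:
--             ans[i]=i
--
--     return ans
-- ===== SOURCE B (Python) =====
-- def modifyArray(arr, n):
--     ans = [-1] * n
--     for v in arr:
--         if 0 <= v < n:
--             ans[v] = v
--     return ans
-- ===== Notes on version B (the rewrite author's own statement) =====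
-- stated objective: simpler
-- what changed: B drops A's hash-table counter and the scan over range(n): it allocates ans=[-1]*n once and in a single pass over arr scatters each in-range value v into ans[v].
import Mathlib
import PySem

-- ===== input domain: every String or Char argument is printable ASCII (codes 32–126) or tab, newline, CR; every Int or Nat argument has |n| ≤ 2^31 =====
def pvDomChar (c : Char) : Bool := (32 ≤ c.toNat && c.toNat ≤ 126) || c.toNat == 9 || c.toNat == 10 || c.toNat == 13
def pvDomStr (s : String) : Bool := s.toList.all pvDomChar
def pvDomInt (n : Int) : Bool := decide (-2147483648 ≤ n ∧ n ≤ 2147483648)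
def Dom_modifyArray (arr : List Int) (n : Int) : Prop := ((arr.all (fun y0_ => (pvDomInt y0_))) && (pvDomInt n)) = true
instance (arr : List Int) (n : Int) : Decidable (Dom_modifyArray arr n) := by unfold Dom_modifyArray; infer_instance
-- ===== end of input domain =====

-- B replaces A's counter dict + scan of range(n) by a single scatter pass over arr; return values are equal on all inputs.

-- ===== PORT A =====
def modifyArray (arr : List Int) (n : Int) : List Int :=
  -- ht = {}; for i in arr: ht[i] += 1 / ht[i] = 1
  let ht : PySem.Dict Int Int :=
    arr.foldl (fun ht i =>
      if ht.contains i then ht.insert i (ht.getD i 0 + 1) else ht.insert i 1)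
      PySem.Dict.empty
  -- ans = [-1]*n
  let ans : List Int := List.replicate n.toNat (-1)
  -- for i in range(0, n): if i in ht: ans[i] = i
  (PySem.List.pyRange 0 n 1).foldl
    (fun ans i => if ht.contains i then PySem.List.pySetD ans i i else ans) ans

-- ===== PORT B =====
def modifyArray_alt (arr : List Int) (n : Int) : List Int :=
  arr.foldl
    (fun ans v => if 0 ≤ v ∧ v < n then PySem.List.pySetD ans v v else ans)
    (List.replicate n.toNat (-1))

-- ===== PRECONDITION & SPEC =====
def Spec_modifyArray (arr : List Int) (n : Int) (out : List Int) : Prop := out = modifyArray_alt arr n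
instance (arr : List Int) (n : Int) (out : List Int) : Decidable (Spec_modifyArray arr n out) := by unfold Spec_modifyArray; infer_instance

-- ===== CLAIM (what is proved, stated in full; the proofs are below) =====
def Claim_equal_modifyArray : Prop := ∀ (arr : List Int) (n : Int), Dom_modifyArray arr n → Spec_modifyArray arr n (modifyArray arr n)

-- ===== LEMMAS AND PROOFS =====

-- the counter dict's key set is exactly the set of elements of arr
theorem ht_contains (arr : List Int) (d : PySem.Dict Int Int) (x : Int) :
    (arr.foldl (fun ht i =>
      if ht.contains i then ht.insert i (ht.getD i 0 + 1) else ht.insert i 1) d).contains x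
      = (d.contains x || decide (x ∈ arr)) := by
  induction arr generalizing d with
  | nil => simp
  | cons v l ih =>
      simp only [List.foldl_cons]
      by_cases h : d.contains v <;>
        [rw [if_pos h, ih]; rw [if_neg h, ih]] <;>
        cases hdx : d.contains x <;> by_cases hx : x = v <;>
          simp [PySem.Dict.contains_insert, hdx, hx, List.mem_cons]

-- generic scatter loop: length is preserved …
theorem scatter_length (p : Int → Prop) [DecidablePred p] (l : List Int) (acc : List Int) :
    (l.foldl (fun ans v => if p v then PySem.List.pySetD ans v v else ans) acc).length
      = acc.length := by
  induction l generalizing acc with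
  | nil => rfl
  | cons v l ih =>
      simp only [List.foldl_cons]
      rw [ih]
      by_cases h : p v <;> simp [h, PySem.List.length_pySetD]

-- … and each cell j holds j if some element v = j with p v was scattered, else its old value
theorem scatter_getElem (p : Int → Prop) [DecidablePred p] (l : List Int)
    (hp : ∀ v ∈ l, p v → 0 ≤ v)
    (acc : List Int) (j : Nat)
    (hj' : j < (l.foldl (fun ans v => if p v then PySem.List.pySetD ans v v else ans) acc).length)
    (hj : j < acc.length) :
    (l.foldl (fun ans v => if p v then PySem.List.pySetD ans v v else ans) acc)[j]'hj'
      = if ((j : Int) ∈ l ∧ p (j : Int)) then (j : Int) else acc[j]'hj := by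
  induction l generalizing acc with
  | nil => simp
  | cons v l ih =>
      simp only [List.foldl_cons] at hj' ⊢
      by_cases hpv : p v
      · rw [if_pos hpv] at hj'
        simp only [hpv, ite_true]
        have hv0 : 0 ≤ v := hp v (List.mem_cons_self ..) hpv
        rw [PySem.List.pySetD_of_nonneg _ _ hv0] at hj'
        simp only [PySem.List.pySetD_of_nonneg _ _ hv0]
        have hacc : j < (acc.set v.toNat v).length := by simp [hj]
        rw [ih (fun w hw => hp w (List.mem_cons_of_mem _ hw)) _ hj' hacc,
          List.getElem_set]
        by_cases hmem : ((j : Int) ∈ l ∧ p (j : Int))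
        · have h2 : ((j : Int) ∈ v :: l ∧ p (j : Int)) :=
            ⟨List.mem_cons_of_mem _ hmem.1, hmem.2⟩
          simp [hmem, h2]
        · by_cases hjv : v.toNat = j
          · have hvj : v = (j : Int) := by omega
            have h2 : ((j : Int) ∈ v :: l ∧ p (j : Int)) :=
              ⟨hvj ▸ List.mem_cons_self .., hvj ▸ hpv⟩
            rw [if_neg hmem, if_pos hjv, if_pos h2, hvj]
          · have h2 : ¬ ((j : Int) ∈ v :: l ∧ p (j : Int)) := by
              rintro ⟨hm, hpj⟩
              rcases List.mem_cons.mp hm with h | h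
              · exact hjv (by omega)
              · exact hmem ⟨h, hpj⟩
            rw [if_neg hmem, if_neg hjv, if_neg h2]
      · rw [if_neg hpv] at hj'
        simp only [hpv, ite_false]
        rw [ih (fun w hw => hp w (List.mem_cons_of_mem _ hw)) _ hj' hj]
        by_cases hmem : ((j : Int) ∈ l ∧ p (j : Int))
        · have h2 : ((j : Int) ∈ v :: l ∧ p (j : Int)) :=
            ⟨List.mem_cons_of_mem _ hmem.1, hmem.2⟩
          rw [if_pos hmem, if_pos h2]
        · have h2 : ¬ ((j : Int) ∈ v :: l ∧ p (j : Int)) := by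
            rintro ⟨hm, hpj⟩
            rcases List.mem_cons.mp hm with h | h
            · exact hpv (h ▸ hpj)
            · exact hmem ⟨h, hpj⟩
          rw [if_neg hmem, if_neg h2]

-- ===== VERDICT (by name: the statement is the Claim_ definition above) =====
theorem modifyArray_spec : Claim_equal_modifyArray := by
  intro arr n _
  unfold Spec_modifyArray modifyArray modifyArray_alt
  simp only []
  have hpA : ∀ v ∈ PySem.List.pyRange 0 n 1,
      (arr.foldl (fun ht i =>
        if ht.contains i then ht.insert i (ht.getD i 0 + 1) else ht.insert i 1)
        (PySem.Dict.empty : PySem.Dict Int Int)).contains v = true → 0 ≤ v := by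
    intro v hv _
    have := PySem.List.mem_pyRange_one.mp hv; omega
  have hpB : ∀ v ∈ arr, (0 ≤ v ∧ v < n) → 0 ≤ v := fun v _ h => h.1
  apply List.ext_getElem
  · rw [scatter_length, scatter_length]
  · intro j hjA hjB
    have hj : j < (List.replicate n.toNat (-1 : Int)).length := by
      rw [scatter_length] at hjB; exact hjB
    rw [scatter_getElem _ _ hpA _ j hjA hj, scatter_getElem _ _ hpB _ j hjB hj]
    have hjn : (j : Int) < n := by
      simp only [List.length_replicate] at hj; omega
    have hrange : (j : Int) ∈ PySem.List.pyRange 0 n 1 :=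
      PySem.List.mem_pyRange_one.mpr (by omega)
    rw [ht_contains]
    by_cases hmem : (j : Int) ∈ arr
    · simp [hrange, hmem, hjn]
    · simp [hmem, hjn]
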